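-- pv_equiv track=rewrite | github.com/hvlaardingerbroek/LinkSyr | morphan.py | check_pattern_length
-- ===== SOURCE A (Python) =====
-- def check_pattern_length(p):
--     '''Returns the length of the expected string for pattern p'''
--     length=len(p)
--     skip=False
--     for c in p:
--         if skip:
--             skip=False
--             continue
--         if c == '+':
--             length -= 2
--             skip=True
--         elif c == '-':
--             length -= 1
--             skip=True
--     return length
-- ===== SOURCE B (Python) =====
-- def _tokens(p):
--     """Greedy left-to-right tokenization: each marker grabs the next char (if any)."""
--     toks = []
--     i = 0
--     n = len(p)
--     while i < n:
--         if p[i] in '+-':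
--             toks.append(p[i:i+2])
--             i += 2
--         else:
--             i += 1
--     return toks
--
-- def check_pattern_length(p):
--     '''Returns the length of the expected string for pattern p'''
--     return len(p) - sum(2 if t[0] == '+' else 1 for t in _tokens(p))
-- ===== Notes on version B (the rewrite author's own statement) =====
-- stated objective: alternative
-- what changed: Replaces A's single scan with a skip flag by tokenize-then-reduce: first extract each marker together with the character it consumes, then subtract 2 per plus-marker token and 1 per minus-marker token from the pattern length.
import Mathlib
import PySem

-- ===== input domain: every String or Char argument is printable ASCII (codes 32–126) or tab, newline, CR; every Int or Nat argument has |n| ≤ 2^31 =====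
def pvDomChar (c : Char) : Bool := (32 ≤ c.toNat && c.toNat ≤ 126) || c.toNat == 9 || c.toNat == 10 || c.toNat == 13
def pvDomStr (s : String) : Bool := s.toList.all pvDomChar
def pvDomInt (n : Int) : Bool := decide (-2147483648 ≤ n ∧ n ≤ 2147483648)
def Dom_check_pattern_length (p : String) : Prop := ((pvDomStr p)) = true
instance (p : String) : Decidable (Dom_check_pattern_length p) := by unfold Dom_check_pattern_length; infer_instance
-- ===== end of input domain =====

-- B: tokenize markers (marker + the char it consumes) then reduce, instead of A's skip-flag scan; same cost.
-- ===== PORT A =====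
def pvStepA (st : Int × Bool) (c : Char) : Int × Bool :=
  if st.2 then (st.1, false)
  else if c = '+' then (st.1 - 2, true)
  else if c = '-' then (st.1 - 1, true)
  else st

def check_pattern_length (p : String) : Int :=
  (p.toList.foldl pvStepA ((p.toList.length : Int), false)).1

-- ===== PORT B =====
-- tokenizer: each marker char grabs the next char (if any); others are skipped
def pvTokens : List Char → List (List Char)
  | [] => []
  | c :: rest =>
    if c = '+' ∨ c = '-' then (c :: rest.take 1) :: pvTokens (rest.drop 1)
    else pvTokens rest
termination_by cs => cs.length
decreasing_by
  all_goals simp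

def check_pattern_length_alt (p : String) : Int :=
  (p.toList.length : Int) -
    (pvTokens p.toList).foldl (fun s t => s + (if t.head? = some '+' then 2 else 1)) 0

-- ===== PRECONDITION & SPEC =====
def Spec_check_pattern_length (p : String) (out : Int) : Prop := out = check_pattern_length_alt p
instance (p : String) (out : Int) : Decidable (Spec_check_pattern_length p out) := by unfold Spec_check_pattern_length; infer_instance

-- ===== CLAIM (what is proved, stated in full; the proofs are below) =====
def Claim_equal_check_pattern_length : Prop := ∀ (p : String), Dom_check_pattern_length p → Spec_check_pattern_length p (check_pattern_length p)

-- ===== LEMMAS AND PROOFS =====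

-- ===== VERDICT (by name: the statement is the Claim_ definition above) =====
theorem pv_sum_shift (ts : List (List Char)) (s : Int) :
    ts.foldl (fun a t => a + (if t.head? = some '+' then 2 else 1)) s
      = s + ts.foldl (fun a t => a + (if t.head? = some '+' then 2 else 1)) 0 := by
  induction ts generalizing s with
  | nil => simp
  | cons t ts ih => simp only [List.foldl_cons]; rw [ih, ih (0 + _)]; ring

theorem pv_main (cs : List Char) (L : Int) :
    (cs.foldl pvStepA (L, false)).1
      = L - (pvTokens cs).foldl (fun a t => a + (if t.head? = some '+' then 2 else 1)) 0 := by
  match cs with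
  | [] => simp [pvTokens]
  | c :: rest =>
    by_cases h : c = '+' ∨ c = '-'
    · have hk : pvStepA (L, false) c = (L - (if c = '+' then 2 else 1), true) := by
        rcases h with h | h <;> simp [pvStepA, h]
      match rest with
      | [] =>
        simp only [List.foldl_cons, hk, List.foldl_nil, pvTokens, if_pos h]
        rcases h with h | h <;> simp [pvTokens, h]
      | d :: rest2 =>
        have ih := pv_main rest2 L
        simp only [List.foldl_cons, hk] at *
        have : pvStepA (L - (if c = '+' then 2 else 1), true) d
            = (L - (if c = '+' then 2 else 1), false) := by simp [pvStepA]
        rw [this]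
        have ih2 := pv_main rest2 (L - (if c = '+' then 2 else 1))
        rw [ih2]
        simp only [pvTokens, if_pos h, List.drop_succ_cons, List.drop_zero, List.foldl_cons]
        rcases h with h | h <;> simp [h] <;>
          linarith [pv_sum_shift (pvTokens rest2) 2, pv_sum_shift (pvTokens rest2) 1]
    · have hnp : ¬ c = '+' := fun hc => h (Or.inl hc)
      have hnm : ¬ c = '-' := fun hc => h (Or.inr hc)
      have ih := pv_main rest L
      simp only [List.foldl_cons, pvStepA, if_neg hnp, if_neg hnm]
      simpa [pvTokens, h] using ih
termination_by cs.length
decreasing_by all_goals simp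

theorem check_pattern_length_spec : Claim_equal_check_pattern_length := by
  intro p _
  unfold Spec_check_pattern_length check_pattern_length check_pattern_length_alt
  exact pv_main p.toList _
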